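-- pv_equiv track=rewrite | github.com/yasarkocyigit/agentic-data-engineer | backend/routers/notebook.py | _sanitize_sql
-- ===== SOURCE A (Python) =====
-- def _strip_sql_line_comment(line: str) -> str:
--     """Remove -- comments while preserving quoted strings."""
--     result: list[str] = []
--     i = 0
--     in_single = False
--     in_double = False
--
--     while i < len(line):
--         ch = line[i]
--         nxt = line[i + 1] if i + 1 < len(line) else ""
--
--         if in_single:
--             result.append(ch)
--             if ch == "'":
--                 if nxt == "'":
--                     result.append(nxt)
--                     i += 2
--                     continue
--                 in_single = False
--             i += 1
--             continue
--
--         if in_double: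
--             result.append(ch)
--             if ch == '"':
--                 in_double = False
--             i += 1
--             continue
--
--         if ch == "'":
--             in_single = True
--             result.append(ch)
--             i += 1
--             continue
--
--         if ch == '"':
--             in_double = True
--             result.append(ch)
--             i += 1
--             continue
--
--         if ch == "-" and nxt == "-":
--             break
--
--         result.append(ch)
--         i += 1
--
--     return "".join(result)
--
-- def _sanitize_sql(raw_sql: str) -> str:
--     """Clean SQL for Trino: strip comments, trailing semicolons, and empty lines."""
--     cleaned_lines: list[str] = []
--     for line in raw_sql.split("\n"):
--         no_comment = _strip_sql_line_comment(line).rstrip()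
--         if no_comment:
--             cleaned_lines.append(no_comment)
--
--     sql = "\n".join(cleaned_lines).strip()
--     while sql.endswith(";"):
--         sql = sql[:-1].rstrip()
--     return sql
-- ===== SOURCE B (Python) =====
-- def _single_end(line: str, j: int) -> int:
--     """Index just past the closing quote of a single-quoted token ('' is an escape)."""
--     n = len(line)
--     while j < n:
--         if line[j] == "'":
--             if j + 1 < n and line[j + 1] == "'":
--                 j += 2
--             else:
--                 return j + 1
--         else:
--             j += 1
--     return n
--
--
-- def _double_end(line: str, j: int) -> int:
--     """Index just past the closing double quote (no escapes)."""
--     n = len(line)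
--     while j < n:
--         if line[j] == '"':
--             return j + 1
--         j += 1
--     return n
--
--
-- def _strip_line(line: str) -> str:
--     """Token scanner: copy whole quoted tokens, cut at the first bare --."""
--     kept = []
--     i, n = 0, len(line)
--     while i < n:
--         ch = line[i]
--         if ch == "'":
--             j = _single_end(line, i + 1)
--             kept.append(line[i:j])
--             i = j
--         elif ch == '"':
--             j = _double_end(line, i + 1)
--             kept.append(line[i:j])
--             i = j
--         elif line.startswith("--", i):
--             break
--         else:
--             kept.append(ch)
--             i += 1
--     return "".join(kept)
--
--
-- def _sanitize_sql(raw_sql: str) -> str: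
--     cleaned = [s for s in (_strip_line(l).rstrip() for l in raw_sql.split("\n")) if s]
--     sql = "\n".join(cleaned).strip()
--     while sql.endswith(";"):
--         sql = sql[:-1].rstrip()
--     return sql
-- ===== Notes on version B (the rewrite author's own statement) =====
-- stated objective: alternative
-- what changed: Replaces A's per-character state machine (in_single/in_double booleans, one char appended per step) by a token scanner that copies whole quoted tokens at once via end-of-token index helpers, and replaces the accumulator loop over lines by a comprehension.
import Mathlib
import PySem

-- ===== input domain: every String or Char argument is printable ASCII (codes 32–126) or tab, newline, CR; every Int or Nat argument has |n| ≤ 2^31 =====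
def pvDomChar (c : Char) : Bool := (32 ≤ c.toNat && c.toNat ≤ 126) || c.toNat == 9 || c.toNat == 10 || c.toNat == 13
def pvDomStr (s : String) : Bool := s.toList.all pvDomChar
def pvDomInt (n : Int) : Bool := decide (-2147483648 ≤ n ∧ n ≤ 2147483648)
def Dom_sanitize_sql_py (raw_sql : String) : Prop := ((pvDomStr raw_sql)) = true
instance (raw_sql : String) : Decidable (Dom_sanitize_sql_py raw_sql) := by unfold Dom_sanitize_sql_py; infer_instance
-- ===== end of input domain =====

-- B replaces A's char-by-char quote-state machine by a token scanner that copies whole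
-- quoted tokens at once (objective: simpler/idiomatic); outer cleanup is a comprehension.

-- (PySem.Chars.rstrip l).length ≤ l.length — cited by pvTrimSemis' termination proof
theorem pvRstripLenLe (l : List Char) : (PySem.Chars.rstrip l).length ≤ l.length := by
  simpa [PySem.Chars.rstrip] using
    List.length_dropWhile_le (p := PySem.Chars.isspace) (l := l.reverse)

-- shared tail loop, identical in both Pythons: while sql.endswith(";"): sql = sql[:-1].rstrip()
def pvTrimSemis (s : List Char) : List Char :=
  if h : PySem.Chars.endswith s [';'] = true then
    pvTrimSemis (PySem.Chars.rstrip s.dropLast)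
  else s
termination_by s.length
decreasing_by
  have hs : ([';'] : List Char) <:+ s := (PySem.Chars.endswith_iff _ _).mp h
  have hne : s ≠ [] := by rintro rfl; simp at hs
  have h1 := pvRstripLenLe s.dropLast
  have h2 : s.dropLast.length < s.length := by
    cases s with
    | nil => exact absurd rfl hne
    | cons a t => simp
  omega

-- ===== PORT A =====
-- _strip_sql_line_comment's while loop: state = (remaining chars, in_single, in_double)
def stripALoop : List Char → Bool → Bool → List Char
  | [], _, _ => []
  | ch :: rest, inS, inD =>
    if inS then
      if ch = '\'' then
        if rest.head? = some '\'' then ch :: '\'' :: stripALoop rest.tail true inD  -- '' escape, i += 2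
        else ch :: stripALoop rest false inD
      else ch :: stripALoop rest true inD
    else if inD then
      if ch = '"' then ch :: stripALoop rest inS false
      else ch :: stripALoop rest inS true
    else if ch = '\'' then ch :: stripALoop rest true inD
    else if ch = '"' then ch :: stripALoop rest inS true
    else if ch = '-' ∧ rest.head? = some '-' then []                 -- break at bare --
    else ch :: stripALoop rest inS inD
termination_by l _ _ => l.length
decreasing_by all_goals cases rest <;> simp_all

def sanitize_sql_py (raw_sql : String) : String :=
  let cleaned := (PySem.Chars.splitOn raw_sql.toList ['\n']).foldl
    (fun acc line =>
      let noComment := PySem.Chars.rstrip (stripALoop line false false)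
      if noComment ≠ [] then acc ++ [noComment] else acc) []
  let sql := PySem.Chars.strip (PySem.Chars.join ['\n'] cleaned)
  String.ofList (pvTrimSemis sql)

-- ===== PORT B =====
-- _single_end: scan past a single-quoted token ('' escape); index j is encoded as the
-- (scanned token, remaining suffix) split of the list
def singleScan : List Char → List Char × List Char
  | [] => ([], [])
  | '\'' :: l =>
    match l with
    | '\'' :: l2 => ('\'' :: '\'' :: (singleScan l2).1, (singleScan l2).2)
    | _ => (['\''], l)
  | c :: l => (c :: (singleScan l).1, (singleScan l).2)

-- _double_end: scan past a double-quoted token (no escapes), same suffix encoding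
def doubleScan : List Char → List Char × List Char
  | [] => ([], [])
  | '"' :: l => (['"'], l)
  | c :: l => (c :: (doubleScan l).1, (doubleScan l).2)

theorem singleScan_snd_le (l : List Char) : (singleScan l).2.length ≤ l.length := by
  fun_induction singleScan l <;> simp_all <;> omega

theorem doubleScan_snd_le (l : List Char) : (doubleScan l).2.length ≤ l.length := by
  fun_induction doubleScan l <;> simp_all <;> omega

-- _strip_line: token scanner — copy whole quoted tokens, cut at the first bare --
def stripB : List Char → List Char
  | [] => []
  | c :: l =>
    if c = '\'' then c :: ((singleScan l).1 ++ stripB (singleScan l).2)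
    else if c = '"' then c :: ((doubleScan l).1 ++ stripB (doubleScan l).2)
    else if PySem.Chars.startswith (c :: l) ['-', '-'] then []
    else c :: stripB l
termination_by l => l.length
decreasing_by
  all_goals simp only [List.length_cons]
  · have := singleScan_snd_le l; omega
  · have := doubleScan_snd_le l; omega
  · omega

def sanitize_sql_py_alt (raw_sql : String) : String :=
  let cleaned := ((PySem.Chars.splitOn raw_sql.toList ['\n']).map
      (fun l => PySem.Chars.rstrip (stripB l))).filter (· ≠ [])
  let sql := PySem.Chars.strip (PySem.Chars.join ['\n'] cleaned)
  String.ofList (pvTrimSemis sql)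

-- ===== PRECONDITION & SPEC =====
def Spec_sanitize_sql_py (raw_sql : String) (out : String) : Prop := out = sanitize_sql_py_alt raw_sql
instance (raw_sql : String) (out : String) : Decidable (Spec_sanitize_sql_py raw_sql out) := by unfold Spec_sanitize_sql_py; infer_instance

-- ===== CLAIM (what is proved, stated in full; the proofs are below) =====
def Claim_equal_sanitize_sql_py : Prop := ∀ (raw_sql : String), Dom_sanitize_sql_py raw_sql → Spec_sanitize_sql_py raw_sql (sanitize_sql_py raw_sql)

-- ===== LEMMAS AND PROOFS =====

-- inside a single-quoted string, A's machine copies exactly the token B's scanner copies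
theorem stripALoop_single (l : List Char) :
    stripALoop l true false = (singleScan l).1 ++ stripALoop (singleScan l).2 false false := by
  fun_induction singleScan l with
  | case1 => simp [stripALoop]
  | case2 l2 ih => simp [stripALoop, ih]
  | case3 l hl => cases l <;> simp_all [stripALoop]
  | case4 c l hc ih =>
      simp [stripALoop, ih]
      exact fun h => absurd h hc

-- inside a double-quoted string, likewise
theorem stripALoop_double (l : List Char) :
    stripALoop l false true = (doubleScan l).1 ++ stripALoop (doubleScan l).2 false false := by
  fun_induction doubleScan l with
  | case1 => simp [stripALoop]
  | case2 => simp [stripALoop]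
  | case3 c l hc ih =>
      simp [stripALoop, ih]
      exact fun h => absurd h hc

@[simp] theorem stripB_eq (l : List Char) : stripB l = stripALoop l false false := by
  fun_induction stripB l with
  | case1 => simp [stripALoop]
  | case2 l ih => simp [stripALoop, stripALoop_single, ih]
  | case3 l h ih => simp [stripALoop, stripALoop_double, ih]
  | case4 c l h1 h2 h3 =>
      obtain ⟨t, ht⟩ := (PySem.Chars.startswith_iff _ _).mp h3
      cases ht
      simp [stripALoop]
  | case5 c l h1 h2 h3 ih =>
      have hdash : ¬ (c = '-' ∧ l.head? = some '-') := by
        rintro ⟨rfl, hh⟩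
        cases l with
        | nil => simp at hh
        | cons b t =>
          simp at hh
          exact h3 ((PySem.Chars.startswith_iff _ _).mpr ⟨t, by simp [hh]⟩)
      simp [stripALoop, h1, h2, hdash, ih]

-- ===== VERDICT (by name: the statement is the Claim_ definition above) =====
theorem sanitize_sql_py_spec : Claim_equal_sanitize_sql_py := by
  intro raw_sql _
  unfold Spec_sanitize_sql_py sanitize_sql_py sanitize_sql_py_alt
  simp only [stripB_eq, ← List.foldl_map
      (f := fun line => PySem.Chars.rstrip (stripALoop line false false))
      (g := fun acc x => if x ≠ [] then acc ++ [x] else acc),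
    PySem.List.foldl_append_ite_eq_filter]
  simp
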